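-- pv_equiv track=rewrite | github.com/Mawak0/OMGTU | OL/30.09.2023/обмен_денег.py | cash_decompiler
-- ===== SOURCE A (Python) =====
-- def delete_bad_numbers(bad_numbers, money):
--     out = money
--     for n in bad_numbers:
--         if out >= n:
--             out = out-1
--     return out
--
-- def cash_decompiler(multiplers, money, bad_numbers):
--     low_money_out = 0
--     multipler = 1
--     for i in range(len(money)-1, -1, -1):
--         low_money_out += delete_bad_numbers(bad_numbers, money[i])*multipler
--         if i != 0:
--             multipler = multipler * multiplers[i-1]
--     return low_money_out
-- ===== SOURCE B (Python) =====
-- def delete_bad_numbers(bad_numbers, money):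
--     out = money
--     for n in bad_numbers:
--         if out >= n:
--             out = out-1
--     return out
--
-- def cash_decompiler(multiplers, money, bad_numbers):
--     if not money:
--         return 0
--     value = delete_bad_numbers(bad_numbers, money[0])
--     for i in range(1, len(money)):
--         value = value * multiplers[i-1] + delete_bad_numbers(bad_numbers, money[i])
--     return value
-- ===== Notes on version B (the rewrite author's own statement) =====
-- stated objective: alternative
-- what changed: Replaces A's back-to-front accumulation of a running positional weight (a pair of accumulators, low_money_out and multipler) by a single forward Horner multiply-accumulate over the mixed-radix digits, with an explicit empty-list guard.
import Mathlib
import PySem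

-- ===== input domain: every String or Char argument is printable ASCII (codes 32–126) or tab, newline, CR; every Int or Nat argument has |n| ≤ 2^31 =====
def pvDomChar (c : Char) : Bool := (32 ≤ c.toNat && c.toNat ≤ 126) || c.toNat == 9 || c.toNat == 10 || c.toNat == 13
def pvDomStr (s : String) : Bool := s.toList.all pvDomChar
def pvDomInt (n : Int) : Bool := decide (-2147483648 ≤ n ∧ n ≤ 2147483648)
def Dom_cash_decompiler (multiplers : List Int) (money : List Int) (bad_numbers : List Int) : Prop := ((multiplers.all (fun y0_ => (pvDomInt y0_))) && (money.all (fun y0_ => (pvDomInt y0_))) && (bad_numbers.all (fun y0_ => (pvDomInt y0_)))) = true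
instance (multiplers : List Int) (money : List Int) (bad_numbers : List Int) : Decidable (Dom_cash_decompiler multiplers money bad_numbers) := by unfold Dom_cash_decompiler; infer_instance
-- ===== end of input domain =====

-- B replaces A's back-to-front weight accumulation by a forward Horner multiply-accumulate (alternative decomposition, same cost).

-- ===== PORT A =====
def delete_bad_numbers (bad_numbers : List Int) (money : Int) : Int :=
  bad_numbers.foldl (fun out n => if out ≥ n then out - 1 else out) money

def cash_decompiler (multiplers : List Int) (money : List Int) (bad_numbers : List Int) : Int :=
  ((PySem.List.pyRange ((money.length : Int) - 1) (-1) (-1)).foldl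
    (fun (st : Int × Int) i =>
      (st.1 + delete_bad_numbers bad_numbers (PySem.List.pyGetD money i 0) * st.2,
       if i ≠ 0 then st.2 * PySem.List.pyGetD multiplers (i - 1) 0 else st.2))
    (0, 1)).1

-- ===== PORT B =====
def cash_decompiler_alt (multiplers : List Int) (money : List Int) (bad_numbers : List Int) : Int :=
  match money with
  | [] => 0
  | m0 :: _ =>
    (PySem.List.pyRange 1 (money.length : Int) 1).foldl
      (fun value i =>
        value * PySem.List.pyGetD multiplers (i - 1) 0
          + delete_bad_numbers bad_numbers (PySem.List.pyGetD money i 0))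
      (delete_bad_numbers bad_numbers m0)

-- ===== PRECONDITION & SPEC =====
-- Pre_ excludes exactly the inputs where the Python A raises IndexError (multiplers shorter
-- than len(money)-1); the Python B raises on exactly the same inputs.
def Pre_cash_decompiler (multiplers : List Int) (money : List Int) (bad_numbers : List Int) : Prop :=
  (money.isEmpty || money.length ≤ multiplers.length + 1) = true
instance (multiplers : List Int) (money : List Int) (bad_numbers : List Int) : Decidable (Pre_cash_decompiler multiplers money bad_numbers) := by unfold Pre_cash_decompiler; infer_instance
def pvWitness_cash_decompiler : List Int × List Int × List Int := ([2, 3], [1, 2, 3], [1])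

def Spec_cash_decompiler (multiplers : List Int) (money : List Int) (bad_numbers : List Int) (out : Int) : Prop := out = cash_decompiler_alt multiplers money bad_numbers
instance (multiplers : List Int) (money : List Int) (bad_numbers : List Int) (out : Int) : Decidable (Spec_cash_decompiler multiplers money bad_numbers out) := by unfold Spec_cash_decompiler; infer_instance

-- ===== CLAIM (what is proved, stated in full; the proofs are below) =====
def Claim_equal_cash_decompiler : Prop := ∀ (multiplers : List Int) (money : List Int) (bad_numbers : List Int), Dom_cash_decompiler multiplers money bad_numbers → Pre_cash_decompiler multiplers money bad_numbers → Spec_cash_decompiler multiplers money bad_numbers (cash_decompiler multiplers money bad_numbers)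

-- ===== LEMMAS AND PROOFS =====

-- A's loop body, as a named step function.
def stepA (multiplers : List Int) (money : List Int) (bad_numbers : List Int)
    (st : Int × Int) (i : Int) : Int × Int :=
  (st.1 + delete_bad_numbers bad_numbers (PySem.List.pyGetD money i 0) * st.2,
   if i ≠ 0 then st.2 * PySem.List.pyGetD multiplers (i - 1) 0 else st.2)

lemma cash_decompiler_eq_stepA (ms money bad : List Int) :
    cash_decompiler ms money bad =
      ((PySem.List.pyRange ((money.length : Int) - 1) (-1) (-1)).foldl (stepA ms money bad) (0, 1)).1 := rfl

-- A's fold is affine in the starting state.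
lemma foldA_affine (ms money bad : List Int) (l : List Int) :
    ∀ (st : Int × Int),
      (l.foldl (stepA ms money bad) st).1
          = st.1 + st.2 * (l.foldl (stepA ms money bad) (0, 1)).1
        ∧ (l.foldl (stepA ms money bad) st).2
          = st.2 * (l.foldl (stepA ms money bad) (0, 1)).2 := by
  induction l with
  | nil => intro st; simp
  | cons i l ih =>
    intro st
    simp only [List.foldl_cons]
    obtain ⟨h1, h2⟩ := ih (stepA ms money bad st i)
    obtain ⟨g1, g2⟩ := ih (stepA ms money bad (0, 1) i)
    rw [h1, h2, g1, g2]
    simp only [stepA]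
    split_ifs <;> constructor <;> ring

-- the step functions for `init ++ [x]` and for `init` agree on indices 0 ≤ i < init.length
lemma stepA_congr (ms bad init : List Int) (x : Int) (i : Int)
    (h0 : 0 ≤ i) (hi : i < (init.length : Int)) (st : Int × Int) :
    stepA ms (init ++ [x]) bad st i = stepA ms init bad st i := by
  have hkey : PySem.List.pyGetD (init ++ [x]) i 0 = PySem.List.pyGetD init i 0 := by
    rw [PySem.List.pyGetD_eq_getElem (init ++ [x]) 0 h0 (by simp; omega),
        PySem.List.pyGetD_eq_getElem init 0 h0 (by omega)]
    rw [List.getElem_append_left (by omega)]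
  simp [stepA, hkey]

lemma A_nil (ms bad : List Int) : cash_decompiler ms [] bad = 0 := by
  rw [cash_decompiler_eq_stepA]
  rw [show ((([] : List Int).length : Int) - 1) = -1 by simp]
  rw [PySem.List.pyRange_neg_one_eq_nil (by omega)]
  rfl

lemma A_singleton (ms bad : List Int) (x : Int) :
    cash_decompiler ms [x] bad = delete_bad_numbers bad x := by
  rw [cash_decompiler_eq_stepA]
  rw [show (([x] : List Int).length : Int) - 1 = 0 by simp]
  rw [PySem.List.pyRange_neg_one_cons (by omega : (-1:Int) < 0)]
  rw [show (0:Int) - 1 = -1 by ring, PySem.List.pyRange_neg_one_eq_nil (by omega)]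
  simp [stepA, PySem.List.pyGetD_zero_cons]

lemma A_snoc (ms bad init : List Int) (x : Int) (h : init ≠ []) :
    cash_decompiler ms (init ++ [x]) bad =
      delete_bad_numbers bad x
        + PySem.List.pyGetD ms ((init.length : Int) - 1) 0 * cash_decompiler ms init bad := by
  have hn : 1 ≤ (init.length : Int) := by
    have := List.length_pos_iff.mpr h; omega
  rw [cash_decompiler_eq_stepA]
  rw [show (((init ++ [x]).length : Int) - 1) = (init.length : Int) by simp]
  rw [PySem.List.pyRange_neg_one_cons (by omega : (-1:Int) < (init.length : Int))]
  rw [List.foldl_cons]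
  have hget : PySem.List.pyGetD (init ++ [x]) (init.length : Int) 0 = x := by
    rw [PySem.List.pyGetD_eq_getElem (init ++ [x]) 0 (by omega) (by simp)]
    simp
  have hstep : stepA ms (init ++ [x]) bad (0, 1) (init.length : Int) =
      (delete_bad_numbers bad x, PySem.List.pyGetD ms ((init.length : Int) - 1) 0) := by
    simp [stepA, hget, h]
  rw [hstep]
  rw [PySem.List.foldl_congr_mem _ (stepA ms (init ++ [x]) bad) (stepA ms init bad) _
      (by
        intro acc i hi
        have hmem := (PySem.List.mem_pyRange_neg_one).1 hi
        exact stepA_congr ms bad init x i (by omega) (by omega) acc)]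
  rw [(foldA_affine ms init bad _
        (delete_bad_numbers bad x, PySem.List.pyGetD ms ((init.length : Int) - 1) 0)).1]
  rw [cash_decompiler_eq_stepA]

lemma B_singleton (ms bad : List Int) (x : Int) :
    cash_decompiler_alt ms [x] bad = delete_bad_numbers bad x := by
  simp only [cash_decompiler_alt]
  rw [show (([x] : List Int).length : Int) = 1 by simp]
  rw [PySem.List.pyRange_one_eq_nil (by omega : (1:Int) ≤ 1)]
  rfl

lemma B_snoc (ms bad init : List Int) (x : Int) (h : init ≠ []) :
    cash_decompiler_alt ms (init ++ [x]) bad =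
      cash_decompiler_alt ms init bad * PySem.List.pyGetD ms ((init.length : Int) - 1) 0
        + delete_bad_numbers bad x := by
  obtain ⟨m0, rest, rfl⟩ : ∃ m0 rest, init = m0 :: rest := by
    cases init with
    | nil => exact absurd rfl h
    | cons a l => exact ⟨a, l, rfl⟩
  simp only [cash_decompiler_alt, List.cons_append]
  have hlc : ((m0 :: rest : List Int).length : Int) = (rest.length : Int) + 1 := by simp
  rw [show (((m0 :: (rest ++ [x])) : List Int).length : Int)
        = ((m0 :: rest : List Int).length : Int) + 1 by simp]
  rw [PySem.List.pyRange_one_succ_right (by omega)]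
  rw [List.foldl_append, List.foldl_cons, List.foldl_nil]
  have hget : PySem.List.pyGetD (m0 :: (rest ++ [x])) ((m0 :: rest : List Int).length : Int) 0 = x := by
    rw [PySem.List.pyGetD_eq_getElem (m0 :: (rest ++ [x])) 0 (by omega) (by simp)]
    simp
  rw [hget]
  rw [PySem.List.foldl_congr_mem _ _
      (fun value i =>
        value * PySem.List.pyGetD ms (i - 1) 0
          + delete_bad_numbers bad (PySem.List.pyGetD (m0 :: rest) i 0)) _
      (by
        intro acc i hi
        have hmem := (PySem.List.mem_pyRange_one).1 hi
        have hi0 : 1 ≤ i := hmem.1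
        have hi1 : i < (rest.length : Int) + 1 := by rw [← hlc]; exact hmem.2
        have hkey : PySem.List.pyGetD (m0 :: (rest ++ [x])) i 0
            = PySem.List.pyGetD (m0 :: rest) i 0 := by
          rw [show (m0 :: (rest ++ [x])) = (m0 :: rest) ++ [x] by simp,
              PySem.List.pyGetD_eq_getElem ((m0 :: rest) ++ [x]) 0 (by omega) (by simp; omega),
              PySem.List.pyGetD_eq_getElem (m0 :: rest) 0 (by omega) (by simp; omega)]
          rw [List.getElem_append_left (by simp; omega)]
        rw [hkey])]

lemma A_eq_B (ms bad money : List Int) :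
    cash_decompiler ms money bad = cash_decompiler_alt ms money bad := by
  induction money using List.reverseRecOn with
  | nil => rw [A_nil]; rfl
  | append_singleton init x ih =>
    by_cases h : init = []
    · subst h; rw [List.nil_append, A_singleton, B_singleton]
    · rw [A_snoc ms bad init x h, B_snoc ms bad init x h, ih]; ring

-- ===== VERDICT (by name: the statement is the Claim_ definition above) =====
theorem cash_decompiler_spec : Claim_equal_cash_decompiler := by
  intro ms money bad _ _
  unfold Spec_cash_decompiler
  exact A_eq_B ms bad money
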